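-- pv_equiv track=rewrite | github.com/artmarchenko/SecureShare | server/analytics.py | _sanitize_str
-- ===== SOURCE A (Python) =====
-- from typing import Any, Optional
--
-- MAX_STRING_LEN = 500             # max length for any string field
--
-- def _sanitize_str(value: Any, max_len: int = MAX_STRING_LEN) -> str:
--     """Sanitize a string field: type check, strip, truncate."""
--     if not isinstance(value, str):
--         value = str(value) if value is not None else ""
--     # Remove null bytes and control chars (except newline/tab for tracebacks)
--     value = "".join(
--         ch for ch in value
--         if ch == "\n" or ch == "\t" or (ord(ch) >= 32 and ord(ch) != 127)
--     )
--     return value[:max_len].strip()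
-- ===== SOURCE B (Python) =====
-- MAX_STRING_LEN = 500             # max length for any string field
--
--
-- def _is_banned(ch):
--     o = ord(ch)
--     return (o < 32 and o != 9 and o != 10) or o == 127
--
--
-- def _sanitize_str(value, max_len=MAX_STRING_LEN):
--     """Sanitize a string field: type check, strip, truncate."""
--     if not isinstance(value, str):
--         value = str(value) if value is not None else ""
--     # Treat banned control chars as delimiters: two-pointer scan extracting
--     # maximal runs of clean characters as slices, then join the runs.
--     pieces = []
--     i, n = 0, len(value)
--     while i < n:
--         if _is_banned(value[i]):
--             i += 1
--             continue
--         j = i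
--         while j < n and not _is_banned(value[j]):
--             j += 1
--         pieces.append(value[i:j])
--         i = j
--     return "".join(pieces)[:max_len].strip()
-- ===== Notes on version B (the rewrite author's own statement) =====
-- stated objective: alternative
-- what changed: Instead of A's per-character filter that tests and emits each character, B treats the banned control characters as delimiters and runs a two-pointer scan that extracts maximal runs of clean characters as whole slices, joining the run list before the slice-and-strip.
import Mathlib
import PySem

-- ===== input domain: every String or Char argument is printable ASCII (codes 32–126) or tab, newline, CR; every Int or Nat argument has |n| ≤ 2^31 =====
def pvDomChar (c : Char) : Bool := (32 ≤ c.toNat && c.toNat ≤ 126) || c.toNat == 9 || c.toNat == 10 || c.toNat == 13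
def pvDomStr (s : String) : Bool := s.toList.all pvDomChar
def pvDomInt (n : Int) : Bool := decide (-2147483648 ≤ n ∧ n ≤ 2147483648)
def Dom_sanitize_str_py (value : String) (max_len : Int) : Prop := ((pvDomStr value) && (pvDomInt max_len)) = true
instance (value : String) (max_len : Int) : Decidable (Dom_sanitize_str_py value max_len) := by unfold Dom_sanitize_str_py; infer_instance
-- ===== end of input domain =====

-- B replaces A's per-character filter by a two-pointer run segmentation: banned control
-- chars act as delimiters, maximal clean runs are extracted as slices and joined (objective: alternative).


-- ===== PORT A =====
-- Port of A: per-character filter (keep '\n', '\t', and ord >= 32 except 127), then [:max_len], then strip().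
def sanitize_str_py (value : String) (max_len : Int) : String :=
  let filtered : List Char := value.toList.filter
    (fun ch => ch == '\n' || ch == '\t' || (decide (32 ≤ ch.toNat) && !(ch.toNat == 127)))
  String.ofList (PySem.Chars.strip (PySem.List.slice filtered none (some max_len)))

-- ===== PORT B =====
-- B's helper _is_banned.
def pvBanned (c : Char) : Bool :=
  (decide (c.toNat < 32) && !(c.toNat == 9) && !(c.toNat == 10)) || c.toNat == 127

-- B's two-pointer run scan: skip a banned char, or take the maximal clean run as one piece.
def pvRuns : List Char → List (List Char)
  | [] => []
  | c :: cs =>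
    if pvBanned c then pvRuns cs
    else
      ((c :: cs).takeWhile (fun x => !pvBanned x)) ::
        pvRuns ((c :: cs).dropWhile (fun x => !pvBanned x))
termination_by l => l.length
decreasing_by
  all_goals simp_all
  exact List.length_dropWhile_le _ _

def sanitize_str_py_alt (value : String) (max_len : Int) : String :=
  String.ofList (PySem.Chars.strip
    (PySem.List.slice (pvRuns value.toList).flatten none (some max_len)))

-- ===== PRECONDITION & SPEC =====
def Spec_sanitize_str_py (value : String) (max_len : Int) (out : String) : Prop := out = sanitize_str_py_alt value max_len
instance (value : String) (max_len : Int) (out : String) : Decidable (Spec_sanitize_str_py value max_len out) := by unfold Spec_sanitize_str_py; infer_instance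

-- ===== CLAIM (what is proved, stated in full; the proofs are below) =====
def Claim_equal_sanitize_str_py : Prop := ∀ (value : String) (max_len : Int), Dom_sanitize_str_py value max_len → Spec_sanitize_str_py value max_len (sanitize_str_py value max_len)

-- ===== LEMMAS AND PROOFS =====

-- A's keep-predicate is the negation of B's banned-predicate.
lemma keep_eq_not_banned (c : Char) :
    (c == '\n' || c == '\t' || (decide (32 ≤ c.toNat) && !(c.toNat == 127))) = !pvBanned c := by
  have hnl : (c == '\n') = decide (c.toNat = 10) := by
    rw [Bool.eq_iff_iff]
    simp only [beq_iff_eq, decide_eq_true_eq]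
    exact ⟨fun h => by subst h; rfl, fun h => Char.ext (UInt32.toNat_inj.mp h)⟩
  have htb : (c == '\t') = decide (c.toNat = 9) := by
    rw [Bool.eq_iff_iff]
    simp only [beq_iff_eq, decide_eq_true_eq]
    exact ⟨fun h => by subst h; rfl, fun h => Char.ext (UInt32.toNat_inj.mp h)⟩
  rw [hnl, htb, Bool.eq_iff_iff]
  simp [pvBanned]
  omega

-- filter distributes over the takeWhile/dropWhile split.
lemma filter_eq_takeWhile_append (p : Char → Bool) (l : List Char) :
    l.filter p = l.takeWhile p ++ (l.dropWhile p).filter p := by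
  induction l with
  | nil => rfl
  | cons a l ih =>
    by_cases h : p a = true
    · simp [List.takeWhile_cons, List.dropWhile_cons, h, ih]
    · simp [List.takeWhile_cons, List.dropWhile_cons, h]

-- joining B's runs yields A's filtered character list (induction on a length bound,
-- since pvRuns recurses on a shorter suffix rather than the tail).
lemma flatten_runs_eq_filter_aux (n : Nat) (cs : List Char) (h : cs.length ≤ n) :
    (pvRuns cs).flatten = cs.filter (fun x => !pvBanned x) := by
  induction n generalizing cs with
  | zero =>
    have : cs = [] := List.length_eq_zero_iff.mp (Nat.le_zero.mp h)
    subst this; rw [pvRuns]; rfl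
  | succ n ih =>
    cases cs with
    | nil => rw [pvRuns]; rfl
    | cons c cs =>
      by_cases hb : pvBanned c = true
      · have hk : (!pvBanned c) = false := by simp [hb]
        rw [pvRuns, if_pos hb, ih cs (by simpa using Nat.lt_succ_iff.mp (Nat.lt_of_lt_of_le (Nat.lt_succ_self _) h))]
        simp [hk]
      · rw [pvRuns, if_neg hb]
        have hlen : ((c :: cs).dropWhile (fun x => !pvBanned x)).length ≤ n := by
          have h1 : (c :: cs).dropWhile (fun x => !pvBanned x) = cs.dropWhile (fun x => !pvBanned x) := by
            simp [hb]
          rw [h1]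
          exact Nat.le_trans (List.length_dropWhile_le _ _) (Nat.lt_succ_iff.mp (Nat.lt_of_lt_of_le (Nat.lt_succ_self _) h))
        rw [List.flatten_cons, ih _ hlen]
        exact (filter_eq_takeWhile_append _ _).symm

lemma flatten_runs_eq_filter (cs : List Char) :
    (pvRuns cs).flatten = cs.filter (fun x => !pvBanned x) :=
  flatten_runs_eq_filter_aux cs.length cs (Nat.le_refl _)

-- ===== VERDICT (by name: the statement is the Claim_ definition above) =====
theorem sanitize_str_py_spec : Claim_equal_sanitize_str_py := by
  intro value max_len _
  unfold Spec_sanitize_str_py sanitize_str_py sanitize_str_py_alt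
  rw [flatten_runs_eq_filter]
  simp only [keep_eq_not_banned]
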